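-- pv_equiv track=rewrite | github.com/willgorick/advent24-python | day24/solution.py | _convert_binary_to_decimal
-- ===== SOURCE A (Python) =====
-- def _convert_binary_to_decimal(solved_values, letter):
--     res = 0
--     i = 0
--     while True:
--         ind = str(i)
--         if i < 10:
--             ind = "0"+str(i)
--         if solved_values.get(f"{letter}{ind}", None) != None:
--             res += (2**i) * solved_values[f"{letter}{ind}"]
--             i += 1
--             continue
--         break
--     return res
-- ===== SOURCE B (Python) =====
-- def _convert_binary_to_decimal(solved_values, letter):
--     n = 0
--     while solved_values.get(f"{letter}{n:02d}") is not None: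
--         n += 1
--     res = 0
--     for i in range(n - 1, -1, -1):
--         res = res * 2 + solved_values[f"{letter}{i:02d}"]
--     return res
-- ===== Notes on version B (the rewrite author's own statement) =====
-- stated objective: alternative
-- what changed: Replaced the single forward while-loop accumulating (2**i)*value with a two-phase scheme: first count the consecutive present bit keys, then combine the values high-to-low with Horner's method (res = res*2 + v), eliminating the explicit 2**i powers.
import Mathlib
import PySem

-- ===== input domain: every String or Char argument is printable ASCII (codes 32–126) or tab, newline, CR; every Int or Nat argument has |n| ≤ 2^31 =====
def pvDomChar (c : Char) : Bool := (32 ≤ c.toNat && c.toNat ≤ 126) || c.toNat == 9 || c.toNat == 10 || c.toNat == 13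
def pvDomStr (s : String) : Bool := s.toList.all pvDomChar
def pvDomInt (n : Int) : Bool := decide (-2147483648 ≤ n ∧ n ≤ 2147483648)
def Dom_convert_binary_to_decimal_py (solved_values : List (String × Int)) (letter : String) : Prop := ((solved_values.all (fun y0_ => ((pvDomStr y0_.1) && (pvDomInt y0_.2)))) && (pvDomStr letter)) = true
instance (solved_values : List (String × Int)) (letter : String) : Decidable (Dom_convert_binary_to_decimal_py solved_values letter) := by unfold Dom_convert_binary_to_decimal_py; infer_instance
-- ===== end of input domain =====

-- B replaces A's forward loop with explicit 2**i weights by a count pass followed by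
-- a high-to-low Horner accumulation (alternative decomposition; no speed claim).

-- dict lookup (first match), shared primitive of both ports
def pvLookup : List (String × Int) → String → Option Int
  | [], _ => none
  | (k, v) :: rest, key => if k == key then some v else pvLookup rest key

-- ===== PORT A =====
-- A's while-True loop; fuel = |dict| + 1 iterations always suffice, since each
-- successful iteration consumes a distinct present key.
def pvALoop (d : List (String × Int)) (letter : String) : Nat → Nat → Int → Int
  | 0, _, res => res
  | fuel + 1, i, res =>
    let ind := PySem.Int.toStr (i : Int)
    let ind := if i < 10 then "0" ++ ind else ind
    match pvLookup d (letter ++ ind) with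
    | some v => pvALoop d letter fuel (i + 1) (res + 2 ^ i * v)
    | none => res

def convert_binary_to_decimal_py (solved_values : List (String × Int)) (letter : String) : Int :=
  pvALoop solved_values letter (solved_values.length + 1) 0 0

-- ===== PORT B =====
-- key f"{letter}{i:02d}" (exact for i ≥ 0: pad one '0' iff i < 10)
def pvKey (letter : String) (i : Nat) : String :=
  letter ++ (if i < 10 then "0" ++ PySem.Int.toStr (i : Int) else PySem.Int.toStr (i : Int))

-- phase 1: count of consecutive present keys (the while n-loop); same fuel bound as A
def pvCount (d : List (String × Int)) (letter : String) : Nat → Nat → Nat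
  | 0, n => n
  | fuel + 1, n =>
    match pvLookup d (pvKey letter n) with
    | some _ => pvCount d letter fuel (n + 1)
    | none => n

-- phase 2: 'for i in range(n-1,-1,-1): res = res*2 + d[key i]', counter = indices left.
-- (Python indexing d[key] raises only on a missing key; here every key is present, the
--  getD 0 default is never used.)
def pvHornerGo (d : List (String × Int)) (letter : String) : Int → Nat → Int
  | res, 0 => res
  | res, m + 1 => pvHornerGo d letter (res * 2 + (pvLookup d (pvKey letter m)).getD 0) m

def convert_binary_to_decimal_py_alt (solved_values : List (String × Int)) (letter : String) : Int :=
  pvHornerGo solved_values letter 0 (pvCount solved_values letter (solved_values.length + 1) 0)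

-- ===== PRECONDITION & SPEC =====
def Spec_convert_binary_to_decimal_py (solved_values : List (String × Int)) (letter : String) (out : Int) : Prop := out = convert_binary_to_decimal_py_alt solved_values letter
instance (solved_values : List (String × Int)) (letter : String) (out : Int) : Decidable (Spec_convert_binary_to_decimal_py solved_values letter out) := by unfold Spec_convert_binary_to_decimal_py; infer_instance

-- ===== CLAIM (what is proved, stated in full; the proofs are below) =====
def Claim_equal_convert_binary_to_decimal_py : Prop := ∀ (solved_values : List (String × Int)) (letter : String), Dom_convert_binary_to_decimal_py solved_values letter → Spec_convert_binary_to_decimal_py solved_values letter (convert_binary_to_decimal_py solved_values letter)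

-- ===== LEMMAS AND PROOFS =====

-- value at bit i (0 if absent; only used where the key is present)
def pvVal (d : List (String × Int)) (letter : String) (i : Nat) : Int :=
  (pvLookup d (pvKey letter i)).getD 0

-- relative count of consecutive present keys starting at i
def pvCRel (d : List (String × Int)) (letter : String) : Nat → Nat → Nat
  | 0, _ => 0
  | fuel + 1, i =>
    match pvLookup d (pvKey letter i) with
    | some _ => pvCRel d letter fuel (i + 1) + 1
    | none => 0

-- Σ_{k < c} 2^(i+k) * v(i+k), peeled from the front
def pvS (d : List (String × Int)) (letter : String) : Nat → Nat → Int
  | _, 0 => 0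
  | i, c + 1 => 2 ^ i * pvVal d letter i + pvS d letter (i + 1) c

theorem pvCount_eq_crel (d : List (String × Int)) (l : String) :
    ∀ fuel i, pvCount d l fuel i = i + pvCRel d l fuel i := by
  intro fuel
  induction fuel with
  | zero => intro i; simp [pvCount, pvCRel]
  | succ f ih =>
    intro i
    simp only [pvCount, pvCRel]
    cases pvLookup d (pvKey l i) with
    | some v => dsimp only; rw [ih]; omega
    | none => simp

theorem pvS_succ_back (d : List (String × Int)) (l : String) :
    ∀ c i, pvS d l i (c + 1) = pvS d l i c + 2 ^ (i + c) * pvVal d l (i + c) := by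
  intro c
  induction c with
  | zero => intro i; simp [pvS]
  | succ m ih =>
    intro i
    calc pvS d l i (m + 1 + 1)
        = 2 ^ i * pvVal d l i + pvS d l (i + 1) (m + 1) := rfl
      _ = 2 ^ i * pvVal d l i + (pvS d l (i + 1) m + 2 ^ (i + 1 + m) * pvVal d l (i + 1 + m)) := by
          rw [ih]
      _ = pvS d l i (m + 1) + 2 ^ (i + (m + 1)) * pvVal d l (i + (m + 1)) := by
          have h1 : i + 1 + m = i + (m + 1) := by omega
          rw [h1]; simp [pvS]; ring

theorem pvALoop_eq (d : List (String × Int)) (l : String) :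
    ∀ fuel i res, pvALoop d l fuel i res = res + pvS d l i (pvCRel d l fuel i) := by
  intro fuel
  induction fuel with
  | zero => intro i res; simp [pvALoop, pvCRel, pvS]
  | succ f ih =>
    intro i res
    show (match pvLookup d (l ++ (if i < 10 then "0" ++ PySem.Int.toStr (i : Int) else PySem.Int.toStr (i : Int))) with
          | some v => pvALoop d l f (i + 1) (res + 2 ^ i * v)
          | none => res) = _
    have hk : l ++ (if i < 10 then "0" ++ PySem.Int.toStr (i : Int) else PySem.Int.toStr (i : Int)) = pvKey l i := rfl
    rw [hk]
    simp only [pvCRel]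
    cases hlk : pvLookup d (pvKey l i) with
    | some v =>
      have hv : pvVal d l i = v := by simp [pvVal, hlk]
      dsimp only
      rw [ih]
      simp [pvS, hv]
      ring
    | none => dsimp only; simp [pvS]

theorem pvHornerGo_eq (d : List (String × Int)) (l : String) :
    ∀ n res, pvHornerGo d l res n = res * 2 ^ n + pvS d l 0 n := by
  intro n
  induction n with
  | zero => intro res; simp [pvHornerGo, pvS]
  | succ m ih =>
    intro res
    calc pvHornerGo d l res (m + 1)
        = pvHornerGo d l (res * 2 + pvVal d l m) m := rfl
      _ = (res * 2 + pvVal d l m) * 2 ^ m + pvS d l 0 m := ih _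
      _ = res * 2 ^ (m + 1) + (pvS d l 0 m + 2 ^ (0 + m) * pvVal d l (0 + m)) := by
          simp [pow_succ]; ring
      _ = res * 2 ^ (m + 1) + pvS d l 0 (m + 1) := by rw [← pvS_succ_back]

-- ===== VERDICT (by name: the statement is the Claim_ definition above) =====
theorem convert_binary_to_decimal_py_spec : Claim_equal_convert_binary_to_decimal_py := by
  intro d l _
  unfold Spec_convert_binary_to_decimal_py convert_binary_to_decimal_py convert_binary_to_decimal_py_alt
  rw [pvALoop_eq, pvHornerGo_eq, pvCount_eq_crel]
  simp
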